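-- pv_equiv track=rewrite | github.com/sunhao-java/kimi-code-switch | src/kimi_code_switch/tui.py | _extract_compact_diff_lines
-- ===== SOURCE A (Python) =====
-- def _extract_compact_diff_lines(diff_text: str) -> dict[str, list[str]]:
--     changes = {"added": [], "removed": [], "modified": []}
--     pending_removed: list[str] = []
--     pending_added: list[str] = []
--
--     def flush_pending() -> None:
--         pairs = min(len(pending_removed), len(pending_added))
--         for index in range(pairs):
--             changes["modified"].append(
--                 f"  ~ {pending_removed[index]} -> {pending_added[index]}"
--             )
--         for line in pending_added[pairs:]:
--             changes["added"].append(f"  + {line}")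
--         for line in pending_removed[pairs:]:
--             changes["removed"].append(f"  - {line}")
--         pending_removed.clear()
--         pending_added.clear()
--
--     for line in diff_text.splitlines():
--         if not line or line.startswith(("---", "+++")):
--             continue
--         if line.startswith("@@"):
--             flush_pending()
--             continue
--         if line.startswith("+"):
--             pending_added.append(line[1:])
--         elif line.startswith("-"):
--             if pending_added:
--                 flush_pending()
--             pending_removed.append(line[1:])
--         else:
--             flush_pending()
--     flush_pending()
--     return changes
-- ===== SOURCE B (Python) =====
-- def _extract_compact_diff_lines(diff_text: str) -> dict[str, list[str]]:
--     # Pass 1: collect (removed, added) groups, closing on the original's flush points.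
--     groups: list[tuple[list[str], list[str]]] = []
--     cur_removed: list[str] = []
--     cur_added: list[str] = []
--
--     def close() -> None:
--         nonlocal cur_removed, cur_added
--         if cur_removed or cur_added:
--             groups.append((cur_removed, cur_added))
--             cur_removed, cur_added = [], []
--
--     for line in diff_text.splitlines():
--         if not line or line.startswith(("---", "+++")):
--             continue
--         if line.startswith("@@"):
--             close()
--         elif line.startswith("+"):
--             cur_added.append(line[1:])
--         elif line.startswith("-"):
--             if cur_added:
--                 close()
--             cur_removed.append(line[1:])
--         else:
--             close()
--     close()
--
--     # Pass 2: format each group.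
--     added: list[str] = []
--     removed: list[str] = []
--     modified: list[str] = []
--     for rem, add in groups:
--         modified.extend(f"  ~ {r} -> {a}" for r, a in zip(rem, add))
--         added.extend(f"  + {a}" for a in add[len(rem):])
--         removed.extend(f"  - {r}" for r in rem[len(add):])
--     return {"added": added, "removed": removed, "modified": modified}
-- ===== Notes on version B (the rewrite author's own statement) =====
-- stated objective: simpler
-- what changed: Replaces A's closure-based mutate-and-flush helper with two separate passes: first collect (removed, added) line groups at the same flush points, then format each group into the added/removed/modified lists.
import Mathlib
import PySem

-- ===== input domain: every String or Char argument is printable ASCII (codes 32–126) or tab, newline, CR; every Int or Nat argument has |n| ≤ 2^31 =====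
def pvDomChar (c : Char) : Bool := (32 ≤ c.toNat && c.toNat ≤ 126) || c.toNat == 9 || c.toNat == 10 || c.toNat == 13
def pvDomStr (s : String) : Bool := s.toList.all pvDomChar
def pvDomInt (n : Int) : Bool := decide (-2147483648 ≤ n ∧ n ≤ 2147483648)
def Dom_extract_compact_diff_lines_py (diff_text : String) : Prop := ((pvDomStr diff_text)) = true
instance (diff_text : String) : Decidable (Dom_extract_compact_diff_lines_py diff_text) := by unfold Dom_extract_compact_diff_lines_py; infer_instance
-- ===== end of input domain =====

-- B replaces A's mutate-and-flush helper with two passes (collect (removed, added) groups, then format each group); objective: simpler decomposition, same cost.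

-- ===== PORT A =====
-- changes triple in dict insertion order: (added, removed, modified)
def pvTripleA := List String × List String × List String
-- A's loop state: (changes, pending_removed, pending_added)
def pvStateA := pvTripleA × List String × List String

-- flush_pending: pair up via range(pairs) indexing, then the leftovers via slices
def pvFlushA (st : pvStateA) : pvStateA :=
  let add := st.1.1; let rem := st.1.2.1; let md := st.1.2.2
  let pr := st.2.1; let pa := st.2.2
  let pairs : Nat := min pr.length pa.length
  let md' := (PySem.List.pyRange 0 (pairs : Int) 1).foldl
      (fun acc i => acc ++ ["  ~ " ++ PySem.List.pyGetD pr i "" ++ " -> " ++ PySem.List.pyGetD pa i ""]) md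
  let add' := (PySem.List.slice pa (some (pairs : Int)) none).foldl
      (fun acc l => acc ++ ["  + " ++ l]) add
  let rem' := (PySem.List.slice pr (some (pairs : Int)) none).foldl
      (fun acc l => acc ++ ["  - " ++ l]) rem
  ((add', rem', md'), [], [])

def pvStepA (st : pvStateA) (line : String) : pvStateA :=
  if line == "" || PySem.Str.startswith line "---" || PySem.Str.startswith line "+++" then st
  else if PySem.Str.startswith line "@@" then pvFlushA st
  else if PySem.Str.startswith line "+" then
    (st.1, st.2.1, st.2.2 ++ [PySem.Str.slice line (some 1) none])
  else if PySem.Str.startswith line "-" then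
    let st' := if st.2.2 ≠ [] then pvFlushA st else st
    (st'.1, st'.2.1 ++ [PySem.Str.slice line (some 1) none], st'.2.2)
  else pvFlushA st

-- the returned dict {"added": …, "removed": …, "modified": …}
def pvOutA (st : pvStateA) : List (String × List String) :=
  [("added", st.1.1), ("removed", st.1.2.1), ("modified", st.1.2.2)]

def extract_compact_diff_lines_py (diff_text : String) : List (String × List String) :=
  pvOutA (pvFlushA ((PySem.Str.splitlines diff_text).foldl pvStepA ((([], [], []) : pvTripleA), [], [])))

-- ===== PORT B =====
-- pass-1 state: (groups, cur_removed, cur_added)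
def pvStateB := List (List String × List String) × List String × List String

def pvCloseB (st : pvStateB) : pvStateB :=
  if st.2.1 ≠ [] ∨ st.2.2 ≠ [] then (st.1 ++ [(st.2.1, st.2.2)], [], []) else st

def pvStepB (st : pvStateB) (line : String) : pvStateB :=
  if line == "" || PySem.Str.startswith line "---" || PySem.Str.startswith line "+++" then st
  else if PySem.Str.startswith line "@@" then pvCloseB st
  else if PySem.Str.startswith line "+" then
    (st.1, st.2.1, st.2.2 ++ [PySem.Str.slice line (some 1) none])
  else if PySem.Str.startswith line "-" then
    let st' := if st.2.2 ≠ [] then pvCloseB st else st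
    (st'.1, st'.2.1 ++ [PySem.Str.slice line (some 1) none], st'.2.2)
  else pvCloseB st

-- pass 2: format one (removed, added) group onto (added, removed, modified)
def pvEmitB (t : pvTripleA) (g : List String × List String) : pvTripleA :=
  (t.1 ++ (g.2.drop g.1.length).map (fun a => "  + " ++ a),
   t.2.1 ++ (g.1.drop g.2.length).map (fun r => "  - " ++ r),
   t.2.2 ++ List.zipWith (fun r a => "  ~ " ++ r ++ " -> " ++ a) g.1 g.2)

def pvOutB (t : pvTripleA) : List (String × List String) :=
  [("added", t.1), ("removed", t.2.1), ("modified", t.2.2)]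

def extract_compact_diff_lines_py_alt (diff_text : String) : List (String × List String) :=
  pvOutB (((pvCloseB ((PySem.Str.splitlines diff_text).foldl pvStepB (([], [], []) : pvStateB))).1).foldl
    pvEmitB (([], [], []) : pvTripleA))

-- ===== PRECONDITION & SPEC =====
def Spec_extract_compact_diff_lines_py (diff_text : String) (out : List (String × List String)) : Prop := out = extract_compact_diff_lines_py_alt diff_text
instance (diff_text : String) (out : List (String × List String)) : Decidable (Spec_extract_compact_diff_lines_py diff_text out) := by unfold Spec_extract_compact_diff_lines_py; infer_instance

-- ===== CLAIM (what is proved, stated in full; the proofs are below) =====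
def Claim_equal_extract_compact_diff_lines_py : Prop := ∀ (diff_text : String), Dom_extract_compact_diff_lines_py diff_text → Spec_extract_compact_diff_lines_py diff_text (extract_compact_diff_lines_py diff_text)

-- ===== LEMMAS AND PROOFS =====

theorem range_min_zip (fmt : String → String → String) (d : String) :
    ∀ (pr pa : List String),
      (List.range (min pr.length pa.length)).map
        (fun k => fmt (pr.getD k d) (pa.getD k d)) = List.zipWith fmt pr pa := by
  intro pr
  induction pr with
  | nil => intro pa; simp
  | cons x pr ih =>
      intro pa
      cases pa with
      | nil => simp
      | cons y pa =>
          simp only [List.length_cons, Nat.succ_min_succ, List.range_succ_eq_map,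
            List.map_cons, List.map_map, List.zipWith_cons_cons, List.getD_cons_zero]
          refine congrArg _ ?_
          rw [← ih pa]
          simp [Function.comp]

theorem drop_min_left (pa pr : List String) :
    pa.drop (min pr.length pa.length) = pa.drop pr.length := by
  rcases Nat.le_total pr.length pa.length with h | h
  · rw [Nat.min_eq_left h]
  · rw [Nat.min_eq_right h, List.drop_eq_nil_of_le h, List.drop_eq_nil_of_le (le_refl _)]

-- A's flush is exactly one B-format step on the pending group
theorem flushA_eq_emit (t : pvTripleA) (pr pa : List String) :
    pvFlushA (t, pr, pa) = (pvEmitB t (pr, pa), [], []) := by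
  obtain ⟨add, rem, md⟩ := t
  simp only [pvFlushA, pvEmitB, PySem.List.foldl_append_singleton_eq_map,
    PySem.List.slice_from_natCast, PySem.List.pyRange_one]
  refine Prod.ext ?_ rfl
  refine Prod.ext ?_ ?_
  · simp [drop_min_left]
  refine Prod.ext ?_ ?_
  · rw [Nat.min_comm]; simp [drop_min_left]
  · simp only [Int.sub_zero, Int.toNat_natCast, List.map_map]
    refine congrArg _ ?_
    rw [← range_min_zip (fun r a => "  ~ " ++ r ++ " -> " ++ a) "" pr pa]
    refine List.map_congr_left ?_
    intro k hk
    simp [PySem.List.pyGetD_natCast]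

theorem emit_nil_nil (t : pvTripleA) : pvEmitB t ([], []) = t := by
  obtain ⟨a, r, m⟩ := t; simp [pvEmitB]

-- the groups accumulator passes through pvCloseB
theorem closeB_app (gs : List (List String × List String)) (pr pa : List String) :
    pvCloseB (gs, pr, pa) =
      (gs ++ (pvCloseB (([], pr, pa) : pvStateB)).1, (pvCloseB (([], pr, pa) : pvStateB)).2) := by
  by_cases h : pr ≠ [] ∨ pa ≠ [] <;> simp [pvCloseB, h]

-- the groups accumulator passes through one pvStepB
theorem stepB_app (gs : List (List String × List String)) (pr pa : List String) (l : String) :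
    pvStepB (gs, pr, pa) l =
      (gs ++ (pvStepB (([], pr, pa) : pvStateB) l).1, (pvStepB (([], pr, pa) : pvStateB) l).2) := by
  simp only [pvStepB]
  split
  · simp
  split
  · exact closeB_app gs pr pa
  split
  · simp
  split
  · by_cases hpa : pa ≠ []
    · rw [if_pos hpa, if_pos hpa, closeB_app gs pr pa]
    · rw [if_neg hpa, if_neg hpa]
      simp
  · exact closeB_app gs pr pa

-- the groups accumulator passes through pass 1
theorem foldB_app (ls : List String) :
    ∀ (gs : List (List String × List String)) (pr pa : List String),
      ls.foldl pvStepB (gs, pr, pa) =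
        (gs ++ (ls.foldl pvStepB (([], pr, pa) : pvStateB)).1,
         (ls.foldl pvStepB (([], pr, pa) : pvStateB)).2) := by
  induction ls with
  | nil => intro gs pr pa; simp
  | cons l ls ih =>
      intro gs pr pa
      simp only [List.foldl_cons]
      rcases hX : pvStepB (([], pr, pa) : pvStateB) l with ⟨g1, p1, q1⟩
      rw [stepB_app gs pr pa l, hX]
      rw [show ((gs ++ (g1, p1, q1).1, (g1, p1, q1).2) : pvStateB) = (gs ++ g1, p1, q1) from rfl]
      rw [ih (gs ++ g1) p1 q1, ih g1 p1 q1, List.append_assoc]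

-- closed groups distribute over the accumulator
theorem groups_app (ls : List String) (gs : List (List String × List String)) (pr pa : List String) :
    (pvCloseB (ls.foldl pvStepB (gs, pr, pa))).1 =
      gs ++ (pvCloseB (ls.foldl pvStepB (([], pr, pa) : pvStateB))).1 := by
  rw [foldB_app ls gs pr pa]
  rcases hX : ls.foldl pvStepB (([], pr, pa) : pvStateB) with ⟨g1, p1, q1⟩
  rw [show ((gs ++ (g1, p1, q1).1, (g1, p1, q1).2) : pvStateB) = (gs ++ g1, p1, q1) from rfl]
  rw [closeB_app (gs ++ g1) p1 q1, closeB_app g1 p1 q1]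
  simp

-- main invariant: finishing A from any state = B-formatting the groups B would still emit
theorem pv_key (ls : List String) :
    ∀ (t : pvTripleA) (pr pa : List String),
      (pvFlushA (ls.foldl pvStepA ((t, pr, pa) : pvStateA))).1 =
        ((pvCloseB (ls.foldl pvStepB (([], pr, pa) : pvStateB))).1).foldl pvEmitB t := by
  induction ls with
  | nil =>
      intro t pr pa
      simp only [List.foldl_nil]
      rw [flushA_eq_emit]
      by_cases h : pr ≠ [] ∨ pa ≠ []
      · simp [pvCloseB, h]
      · push Not at h
        obtain ⟨h1, h2⟩ := h
        subst h1; subst h2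
        simp [pvCloseB, emit_nil_nil]
  | cons l ls ih =>
      intro t pr pa
      simp only [List.foldl_cons, pvStepA, pvStepB]
      by_cases h1 : (l == "" || PySem.Str.startswith l "---" || PySem.Str.startswith l "+++") = true
      · rw [if_pos h1, if_pos h1]; exact ih t pr pa
      rw [if_neg h1, if_neg h1]
      by_cases hc : pr ≠ [] ∨ pa ≠ []
      case neg =>
        -- both pendings empty: every flush/close is a no-op on the state shape
        push Not at hc
        obtain ⟨e1, e2⟩ := hc
        subst e1; subst e2
        have hfl : pvFlushA ((t, [], []) : pvStateA) = (t, [], []) := by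
          rw [flushA_eq_emit, emit_nil_nil]
        have hcl : pvCloseB (([], [], []) : pvStateB) = ([], [], []) := by simp [pvCloseB]
        by_cases h2 : PySem.Str.startswith l "@@" = true
        · rw [if_pos h2, if_pos h2, hfl, hcl]; exact ih t [] []
        rw [if_neg h2, if_neg h2]
        by_cases h3 : PySem.Str.startswith l "+" = true
        · rw [if_pos h3, if_pos h3]; exact ih t [] [PySem.Str.slice l (some 1) none]
        rw [if_neg h3, if_neg h3]
        by_cases h4 : PySem.Str.startswith l "-" = true
        · rw [if_pos h4, if_pos h4]
          simp only [ne_eq, not_true_eq_false]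
          exact ih t [PySem.Str.slice l (some 1) none] []
        · rw [if_neg h4, if_neg h4, hfl, hcl]; exact ih t [] []
      case pos =>
        have hcl : pvCloseB (([], pr, pa) : pvStateB) = ([(pr, pa)], [], []) := by
          simp [pvCloseB, hc]
        by_cases h2 : PySem.Str.startswith l "@@" = true
        · rw [if_pos h2, if_pos h2, flushA_eq_emit, hcl,
            ih (pvEmitB t (pr, pa)) [] [], groups_app ls [(pr, pa)] [] []]
          simp
        rw [if_neg h2, if_neg h2]
        by_cases h3 : PySem.Str.startswith l "+" = true
        · rw [if_pos h3, if_pos h3]; exact ih t pr (pa ++ [PySem.Str.slice l (some 1) none])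
        rw [if_neg h3, if_neg h3]
        by_cases h4 : PySem.Str.startswith l "-" = true
        · rw [if_pos h4, if_pos h4]
          by_cases hpa : pa ≠ []
          · rw [if_pos hpa, if_pos hpa, flushA_eq_emit, hcl]
            rw [show ((((pvEmitB t (pr, pa), [], []) : pvStateA).1,
                ((pvEmitB t (pr, pa), [], []) : pvStateA).2.1 ++ [PySem.Str.slice l (some 1) none],
                ((pvEmitB t (pr, pa), [], []) : pvStateA).2.2) : pvStateA)
              = ((pvEmitB t (pr, pa), [PySem.Str.slice l (some 1) none], []) : pvStateA) from rfl]
            rw [ih (pvEmitB t (pr, pa)) [PySem.Str.slice l (some 1) none] []]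
            rw [show (((([(pr, pa)], [], []) : pvStateB).1,
                (([(pr, pa)], [], []) : pvStateB).2.1 ++ [PySem.Str.slice l (some 1) none],
                (([(pr, pa)], [], []) : pvStateB).2.2) : pvStateB)
              = (([(pr, pa)], [PySem.Str.slice l (some 1) none], []) : pvStateB) from rfl]
            rw [groups_app ls [(pr, pa)] [PySem.Str.slice l (some 1) none] []]
            simp
          · rw [if_neg hpa, if_neg hpa]
            exact ih t (pr ++ [PySem.Str.slice l (some 1) none]) pa
        · rw [if_neg h4, if_neg h4, flushA_eq_emit, hcl,
            ih (pvEmitB t (pr, pa)) [] [], groups_app ls [(pr, pa)] [] []]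
          simp

-- ===== VERDICT (by name: the statement is the Claim_ definition above) =====
theorem extract_compact_diff_lines_py_spec : Claim_equal_extract_compact_diff_lines_py := by
  intro diff_text _
  unfold Spec_extract_compact_diff_lines_py extract_compact_diff_lines_py extract_compact_diff_lines_py_alt
  rw [show ∀ st : pvStateA, pvOutA st = pvOutB st.1 from fun _ => rfl]
  rw [pv_key (PySem.Str.splitlines diff_text) ([], [], []) [] []]
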